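-- pv_equiv track=rewrite | github.com/arisosoftware/fsm | src/main/nlp2/tmp_extract_flight_info.py | extract_flight_info
-- ===== SOURCE A (Python) =====
-- def extract_flight_info(input_text):
--     # Split the input into lines
--     lines = input_text.split('\n')
--
--     # Initialize a variable to store flight information
--     flight_info = []
--
--     # Initialize a flag to indicate when to capture flight data
--     capture_data = False
--
--     # Process each line
--     for line in lines:
--         if "Total_Time::" in line:
--             # Stop capturing data when "Total_Time::" is encountered
--             capture_data = False
--         if capture_data:
--             flight_info.append(line)
--         if "Total_Time::" in line:
--             # Start capturing data when "Total_Time::" is encountered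
--             capture_data = True
--
--     return flight_info
-- ===== SOURCE B (Python) =====
-- def extract_flight_info(input_text):
--     # Treat "Total_Time::" lines as separators: split the lines into segments,
--     # drop the segment before the first separator, concatenate the rest.
--     done = []
--     current = []
--     for line in input_text.split('\n'):
--         if "Total_Time::" in line:
--             done.append(current)
--             current = []
--         else:
--             current.append(line)
--     done.append(current)
--     flat = []
--     for seg in done[1:]:
--         flat += seg
--     return flat
-- ===== Notes on version B (the rewrite author's own statement) =====
-- stated objective: alternative
-- what changed: Instead of a capture flag, B treats marker lines as separators: it splits the lines into a list of segments delimited by 'Total_Time::' lines, drops the first segment (the prefix before the first marker), and concatenates the remaining segments.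
import Mathlib
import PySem

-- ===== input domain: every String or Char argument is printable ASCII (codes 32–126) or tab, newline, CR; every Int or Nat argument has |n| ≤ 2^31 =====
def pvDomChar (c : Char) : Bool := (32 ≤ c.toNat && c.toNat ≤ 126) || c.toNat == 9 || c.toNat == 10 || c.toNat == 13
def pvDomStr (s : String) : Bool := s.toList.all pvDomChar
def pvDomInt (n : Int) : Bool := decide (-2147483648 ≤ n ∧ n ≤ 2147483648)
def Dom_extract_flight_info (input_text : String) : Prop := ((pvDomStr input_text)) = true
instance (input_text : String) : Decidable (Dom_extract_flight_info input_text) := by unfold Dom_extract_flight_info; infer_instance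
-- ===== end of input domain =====

-- B splits the lines into segments delimited by "Total_Time::" marker lines, drops the
-- first segment and concatenates the rest, instead of A's capture-flag pass (objective: alternative).
-- ===== PORT A =====
def afiStep (st : List String × Bool) (line : String) : List String × Bool :=
  let capture := if PySem.Str.isIn "Total_Time::" line then false else st.2
  let flight_info := if capture then st.1 ++ [line] else st.1
  let capture := if PySem.Str.isIn "Total_Time::" line then true else capture
  (flight_info, capture)

def extract_flight_info (input_text : String) : List String :=
  let lines := (PySem.Str.split? input_text "\n").getD []
  (lines.foldl afiStep ([], false)).1

-- ===== PORT B =====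
-- state = (done segments, current segment)
def bStep (st : List (List String) × List String) (line : String) :
    List (List String) × List String :=
  if PySem.Str.isIn "Total_Time::" line then (st.1 ++ [st.2], [])
  else (st.1, st.2 ++ [line])

def extract_flight_info_alt (input_text : String) : List String :=
  let lines := (PySem.Str.split? input_text "\n").getD []
  let st := lines.foldl bStep ([], [])
  let done := st.1 ++ [st.2]
  (PySem.List.slice done (some 1) none).foldl (fun flat seg => flat ++ seg) []

-- ===== PRECONDITION & SPEC =====
def Spec_extract_flight_info (input_text : String) (out : List String) : Prop := out = extract_flight_info_alt input_text
instance (input_text : String) (out : List String) : Decidable (Spec_extract_flight_info input_text out) := by unfold Spec_extract_flight_info; infer_instance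

-- ===== CLAIM (what is proved, stated in full; the proofs are below) =====
def Claim_equal_extract_flight_info : Prop := ∀ (input_text : String), Dom_extract_flight_info input_text → Spec_extract_flight_info input_text (extract_flight_info input_text)

-- ===== LEMMAS AND PROOFS =====
-- pure characterisation of B's segment-building loop
def segs (cur : List String) : List String → List (List String)
  | [] => [cur]
  | l :: ls => if PySem.Str.isIn "Total_Time::" l then cur :: segs [] ls
               else segs (cur ++ [l]) ls

lemma bStep_segs (lines : List String) (done : List (List String)) (cur : List String) :
    (lines.foldl bStep (done, cur)).1 ++ [(lines.foldl bStep (done, cur)).2] =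
      done ++ segs cur lines := by
  induction lines generalizing done cur with
  | nil => simp [segs]
  | cons l ls ih =>
    by_cases h : PySem.Str.isIn "Total_Time::" l = true <;> simp at h <;>
      simp [List.foldl_cons, bStep, h, segs, ih]

lemma flatten_segs (lines cur : List String) :
    (segs cur lines).flatten = cur ++ lines.filter (fun l => !PySem.Str.isIn "Total_Time::" l) := by
  induction lines generalizing cur with
  | nil => simp [segs]
  | cons l ls ih =>
    by_cases h : PySem.Str.isIn "Total_Time::" l = true <;> simp at h <;> simp [segs, h, ih]

lemma tail_segs_flatten (lines cur : List String) :
    (segs cur lines).tail.flatten =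
      (match lines.findIdx? (fun line => PySem.Str.isIn "Total_Time::" line) with
       | none => []
       | some i => (lines.drop (i + 1)).filter (fun l => !PySem.Str.isIn "Total_Time::" l)) := by
  induction lines generalizing cur with
  | nil => simp [segs]
  | cons l ls ih =>
    by_cases h : PySem.Str.isIn "Total_Time::" l = true
    · simp at h
      simp [segs, h, List.findIdx?_cons, flatten_segs]
    · simp only [segs, List.findIdx?_cons, if_neg h]
      rw [ih]
      cases hf : ls.findIdx? (fun line => PySem.Str.isIn "Total_Time::" line) <;> simp

-- flat += seg loop is flatten
lemma foldl_append_flatten (segs : List (List String)) (acc : List String) :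
    segs.foldl (fun flat seg => flat ++ seg) acc = acc ++ segs.flatten := by
  induction segs generalizing acc with
  | nil => simp
  | cons s ss ih => simp [List.foldl_cons, ih]

-- A's flag loop from capture = true appends every non-marker line
lemma afi_loop_true (lines : List String) (acc : List String) :
    lines.foldl afiStep (acc, true) =
      (acc ++ lines.filter (fun l => !PySem.Str.isIn "Total_Time::" l), true) := by
  induction lines generalizing acc with
  | nil => simp
  | cons l ls ih =>
    by_cases h : PySem.Str.isIn "Total_Time::" l = true <;> simp at h <;>
      simp [List.foldl_cons, afiStep, h, ih]

-- A's whole loop equals 'filter the suffix after the first marker line'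
lemma afi_loop_false (lines : List String) (acc : List String) :
    (lines.foldl afiStep (acc, false)).1 =
      acc ++ (match lines.findIdx? (fun line => PySem.Str.isIn "Total_Time::" line) with
              | none => []
              | some i => (lines.drop (i + 1)).filter (fun l => !PySem.Str.isIn "Total_Time::" l)) := by
  induction lines generalizing acc with
  | nil => simp
  | cons l ls ih =>
    by_cases h : PySem.Str.isIn "Total_Time::" l = true
    · simp at h
      simp [List.foldl_cons, afiStep, h, afi_loop_true, List.findIdx?_cons]
    · simp only [List.foldl_cons, afiStep, h, if_false, List.findIdx?_cons, Bool.false_eq_true]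
      rw [ih]
      cases hf : ls.findIdx? (fun line => PySem.Str.isIn "Total_Time::" line) <;> simp

-- ===== VERDICT (by name: the statement is the Claim_ definition above) =====
theorem extract_flight_info_spec : Claim_equal_extract_flight_info := by
  intro s _
  unfold Spec_extract_flight_info extract_flight_info extract_flight_info_alt
  rw [afi_loop_false]
  simp only [List.nil_append, PySem.List.slice_from_one, foldl_append_flatten, bStep_segs]
  exact (tail_segs_flatten ((PySem.Str.split? s "\n").getD []) []).symm
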